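-- pv_equiv track=rewrite | github.com/ylight23/cryptography | MSEC CTF newbie/sweet RSA decode.py | fermat
-- ===== SOURCE A (Python) =====
-- def isqrt(n):
--     x = n
--     y = (x + n // x) // 2
--     while y < x:
--         x = y
--         y = (x + n // x) // 2
--     return x
--
-- def fermat(n):
--     a = isqrt(n)
--     b2 = a*a - n
--     b = isqrt(n)
--     count = 0
--     while b*b != b2:
--         a = a + 1
--         b2 = a*a - n
--         b = isqrt(b2)
--         count += 1
--     p = a+b
--     q = a-b
--     assert n == p * q
--     return p, q
-- ===== SOURCE B (Python) =====
-- def fermat(n):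
--     # Closest same-parity factor pair p*q = n, p >= q: one scan of the
--     # divisors d = 1..isqrt(n), keeping the largest d with d and n//d of
--     # equal parity (so that p+q is even, as Fermat factorization requires).
--     d = 1
--     best = 1
--     while d * d <= n:
--         if n % d == 0 and (d + n // d) % 2 == 0:
--             best = d
--         d += 1
--     return (n // best, best)
-- ===== Notes on version B (the rewrite author's own statement) =====
-- stated objective: alternative
-- what changed: B replaces Fermat's upward search for an a with a^2-n a perfect square (plus a Newton isqrt per step) by a single scan over d = 1..isqrt(n) keeping the largest divisor d of n with d and n//d of equal parity, returning (n//d, d).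
-- intended difference: On perfect squares n >= 9 A's stale initial b = isqrt(n) makes it skip the exact pair, returning the pair from the second-largest admissible divisor (e.g. (9,1) for n=9), while B returns the intended closest pair (sqrt(n), sqrt(n)). — e.g. on fermat(9): A returns [9, 1], B returns [3, 3]
-- outside the precondition, e.g. on fermat(-5): A returns (1, -5), B returns (-5, 1); on fermat(-8): A returns (2, -4), B returns (-8, 1); on fermat(0): A raises ZeroDivisionError, B returns (0, 1)
import Mathlib
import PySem

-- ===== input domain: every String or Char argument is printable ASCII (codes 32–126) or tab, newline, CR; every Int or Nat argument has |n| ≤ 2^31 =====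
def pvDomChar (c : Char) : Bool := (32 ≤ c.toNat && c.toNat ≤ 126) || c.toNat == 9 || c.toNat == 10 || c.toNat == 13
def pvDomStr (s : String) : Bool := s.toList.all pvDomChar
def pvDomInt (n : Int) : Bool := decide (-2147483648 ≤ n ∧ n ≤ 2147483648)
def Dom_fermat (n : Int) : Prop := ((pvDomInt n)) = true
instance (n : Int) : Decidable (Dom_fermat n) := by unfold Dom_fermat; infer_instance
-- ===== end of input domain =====

-- B replaces Fermat's upward search for a with a*a - n a perfect square by one scan over
-- d = 1..isqrt(n) keeping the largest divisor d of n with d and n // d of equal parity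
-- (objective: alternative).

-- ===== PORT A =====
-- while-loop of Python's isqrt (Newton iteration), with fuel; fuel n.toNat + 1 is proved
-- sufficient on the admitted inputs (each step strictly decreases x).
def isqrtLoop (n x : Int) : Nat → Int
  | 0 => x
  | f + 1 =>
    if PySem.Int.floordiv (x + PySem.Int.floordiv n x) 2 < x then
      isqrtLoop n (PySem.Int.floordiv (x + PySem.Int.floordiv n x) 2) f
    else x

def isqrt (n : Int) : Int :=
  isqrtLoop n n (n.toNat + 1)

-- while-loop of Python's fermat, with fuel (proved sufficient under Pre_); the unused
-- `count` variable is dropped; the final `assert n == p*q` holds whenever the loop exits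
-- (p*q = a*a - b*b = n), so it never fires and is not ported.
def fermatLoop (n : Int) (a b2 b : Int) : Nat → Int × Int
  | 0 => (a, b)
  | f + 1 =>
    if b * b ≠ b2 then
      fermatLoop n (a + 1) ((a + 1) * (a + 1) - n) (isqrt ((a + 1) * (a + 1) - n)) f
    else (a, b)

def fermat (n : Int) : List Int :=
  let a := isqrt n
  let b2 := a * a - n
  let b := isqrt n
  let r := fermatLoop n a b2 b (n.toNat + 2)
  [r.1 + r.2, r.1 - r.2]

-- ===== PORT B =====
-- single scan d = 1,2,…: keep the largest divisor d of n with d ≡ n//d (mod 2); the loop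
-- exits as soon as d*d > n, so fuel n.toNat + 2 is proved sufficient.
def altLoop (n : Int) (d best : Int) : Nat → Int
  | 0 => best
  | f + 1 =>
    if d * d ≤ n then
      altLoop n (d + 1)
        (if PySem.Int.mod n d = 0 ∧ PySem.Int.mod (d + PySem.Int.floordiv n d) 2 = 0 then d
         else best) f
    else best

def fermat_alt (n : Int) : List Int :=
  let best := altLoop n 1 1 (n.toNat + 2)
  [PySem.Int.floordiv n best, best]

-- ===== PRECONDITION & SPEC =====
-- Pre_ restricts to the natural domain of Fermat factorization: n ≥ 3 admitting a
-- same-parity factor pair. A raises ZeroDivisionError on n = 0, loops forever on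
-- n % 4 = 2 and on n ∈ {1, 4}, and on negative n its value (the widest factor pair,
-- e.g. (1, -5)) is an artefact of starting the scan at a = isqrt(n) = n.
def Pre_fermat (n : Int) : Prop := 3 ≤ n ∧ n % 4 ≠ 2 ∧ n ≠ 4
instance (n : Int) : Decidable (Pre_fermat n) := by unfold Pre_fermat; infer_instance

def pvWitness_fermat : Int := 15

-- kernel-computable floor square root (fueled binary search), used only to state D_;
-- proved equal to Int.sqrt on nonnegative inputs below.
def sqAux (n : Int) : Nat → Int → Int → Int
  | 0, lo, _ => lo
  | f + 1, lo, hi =>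
    if hi ≤ lo then lo
    else
      if PySem.Int.floordiv (lo + hi + 1) 2 * PySem.Int.floordiv (lo + hi + 1) 2 ≤ n then
        sqAux n f (PySem.Int.floordiv (lo + hi + 1) 2) hi
      else
        sqAux n f lo (PySem.Int.floordiv (lo + hi + 1) 2 - 1)

def intSqrt (n : Int) : Int := sqAux n (n.toNat + 1) 0 n

-- On perfect squares n ≥ 9 A's stale initial b = isqrt(n) skips the exact pair and A
-- returns the pair from the second-largest admissible divisor (e.g. (9, 1) for n = 9),
-- while B returns the intended closest pair (√n, √n).
def D_fermat (n : Int) : Prop := 9 ≤ n ∧ intSqrt n * intSqrt n = n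
instance (n : Int) : Decidable (D_fermat n) := by unfold D_fermat; infer_instance

def Spec_fermat (n : Int) (out : List Int) : Prop := ¬ D_fermat n → out = fermat_alt n
instance (n : Int) (out : List Int) : Decidable (Spec_fermat n out) := by
  unfold Spec_fermat; infer_instance

def pvDiffWitness_fermat : Int := 9
def pvDiffWitnessOut_fermat : (List Int) × (List Int) := ([9, 1], [3, 3])

-- ===== CLAIM (what is proved, stated in full; the proofs are below) =====
def Claim_unchanged_fermat : Prop :=
  ∀ (n : Int), Dom_fermat n → Pre_fermat n → Spec_fermat n (fermat n)
def Claim_changed_fermat : Prop :=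
  Dom_fermat (pvDiffWitness_fermat) ∧ Pre_fermat (pvDiffWitness_fermat) ∧
  D_fermat (pvDiffWitness_fermat) ∧
  fermat (pvDiffWitness_fermat) = pvDiffWitnessOut_fermat.1 ∧
  fermat_alt (pvDiffWitness_fermat) = pvDiffWitnessOut_fermat.2 ∧
  pvDiffWitnessOut_fermat.1 ≠ pvDiffWitnessOut_fermat.2
def Claim_exact_fermat : Prop :=
  ∀ (n : Int), Dom_fermat n → Pre_fermat n → D_fermat n → fermat n ≠ fermat_alt n

-- ===== LEMMAS AND PROOFS =====

-- `c` is an admissible divisor of `n`: positive, at most √n, and the cofactor has the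
-- same parity (so that the Fermat pair ((c + n/c)/2, (n/c - c)/2) is integral).
def Good (n c : Int) : Prop := 1 ≤ c ∧ c ∣ n ∧ c * c ≤ n ∧ (c + n / c) % 2 = 0

-- --- Int.sqrt bracketing (from Nat.sqrt) ---
lemma sqrt_sq_le (n : Int) (hn : 0 ≤ n) : Int.sqrt n * Int.sqrt n ≤ n := by
  have h : ((Nat.sqrt n.toNat : Int)) * (Nat.sqrt n.toNat : Int) ≤ (n.toNat : Int) := by
    exact_mod_cast Nat.sqrt_le n.toNat
  simpa [Int.sqrt, Int.toNat_of_nonneg hn] using h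

lemma lt_succ_sqrt_sq (n : Int) (hn : 0 ≤ n) : n < (Int.sqrt n + 1) * (Int.sqrt n + 1) := by
  have h : ((n.toNat : Int)) < ((Nat.sqrt n.toNat : Int) + 1) * ((Nat.sqrt n.toNat : Int) + 1) := by
    exact_mod_cast Nat.lt_succ_sqrt n.toNat
  simpa [Int.sqrt, Int.toNat_of_nonneg hn] using h

lemma le_sqrt_of_sq_le (c n : Int) (hc : 0 ≤ c) (h : c * c ≤ n) : c ≤ Int.sqrt n := by
  have hn0 : 0 ≤ n := le_trans (mul_nonneg hc hc) h
  have key : c.toNat * c.toNat ≤ n.toNat := by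
    zify [Int.toNat_of_nonneg hc, Int.toNat_of_nonneg hn0]; exact h
  have h2 : c.toNat ≤ Nat.sqrt n.toNat := Nat.le_sqrt.mpr key
  have h3 : (c.toNat : Int) ≤ (Nat.sqrt n.toNat : Int) := by exact_mod_cast h2
  simpa [Int.sqrt, Int.toNat_of_nonneg hc] using h3

lemma sqrt_sq_self (b : Int) (hb : 0 ≤ b) : Int.sqrt (b * b) = b := by
  rw [Int.sqrt_eq]; exact Int.natAbs_of_nonneg hb

lemma one_le_sqrt (n : Int) (hn : 1 ≤ n) : 1 ≤ Int.sqrt n :=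
  le_sqrt_of_sq_le 1 n (by norm_num) (by linarith)

lemma sqrt_le_self (n : Int) (hn : 1 ≤ n) : Int.sqrt n ≤ n := by
  have h1 := sqrt_sq_le n (by omega)
  have h2 := one_le_sqrt n hn
  nlinarith

-- --- the kernel-computable sqrt used by D_ agrees with Int.sqrt ---
lemma sqAux_eq (n : Int) (hn : 0 ≤ n) :
    ∀ (f : Nat) (lo hi : Int), 0 ≤ lo → lo ≤ Int.sqrt n → Int.sqrt n ≤ hi →
      (hi - lo).toNat < f → sqAux n f lo hi = Int.sqrt n := by
  intro f
  induction f with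
  | zero => intro lo hi _ _ _ hf; omega
  | succ f ih =>
    intro lo hi hlo0 hlo hhi hf
    simp only [sqAux]
    by_cases hle : hi ≤ lo
    · rw [if_pos hle]; omega
    · rw [if_neg hle]
      have hlt : lo + 1 ≤ hi := by omega
      have hmid := PySem.Int.floordiv_two_mid_bounds hlt
      have hm : PySem.Int.floordiv (lo + 1 + hi) 2 = PySem.Int.floordiv (lo + hi + 1) 2 := by
        ring_nf
      set m := PySem.Int.floordiv (lo + hi + 1) 2 with hmdef
      rw [hm] at hmid
      by_cases hc : m * m ≤ n
      · rw [if_pos hc]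
        have hms : m ≤ Int.sqrt n := le_sqrt_of_sq_le m n (by omega) hc
        exact ih m hi (by omega) hms hhi (by omega)
      · rw [if_neg hc]
        have hms : Int.sqrt n < m := by
          rcases le_or_gt m (Int.sqrt n) with h | h
          · exfalso
            have h0 := Int.sqrt_nonneg n
            have hmm : m * m ≤ Int.sqrt n * Int.sqrt n := by nlinarith
            exact hc (le_trans hmm (sqrt_sq_le n hn))
          · exact h
        exact ih lo (m - 1) hlo0 hlo (by omega) (by omega)

lemma intSqrt_eq (n : Int) (hn : 0 ≤ n) : intSqrt n = Int.sqrt n := by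
  rcases eq_or_lt_of_le hn with h0 | h1
  · rw [← h0]
    simp [intSqrt, sqAux, Int.sqrt]
  · exact sqAux_eq n hn (n.toNat + 1) 0 n le_rfl (Int.sqrt_nonneg n)
      (sqrt_le_self n (by omega)) (by omega)

-- --- isqrt correctness (Newton iteration from x = n) ---
lemma isqrt_step_ge (n x : Int) (hn : 1 ≤ n) (hx : 1 ≤ x) :
    Int.sqrt n ≤ PySem.Int.floordiv (x + PySem.Int.floordiv n x) 2 := by
  have hq := (PySem.Int.floordiv_eq_iff_of_pos (show (0:Int) < x by omega)).mp
    (rfl : PySem.Int.floordiv n x = PySem.Int.floordiv n x)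
  set q := PySem.Int.floordiv n x with hqdef
  have hss := sqrt_sq_le n (by omega)
  have hs0 := Int.sqrt_nonneg n
  refine (PySem.Int.le_floordiv_iff_mul_le (show (0:Int) < 2 by norm_num)).mpr ?_
  rcases le_or_gt (Int.sqrt n * 2) (x + q) with h | h
  · exact h
  · exfalso
    nlinarith [hq.2, mul_self_nonneg (x - Int.sqrt n)]

lemma isqrt_step_lt (n x : Int) (hn : 1 ≤ n) (hx : Int.sqrt n + 1 ≤ x) :
    PySem.Int.floordiv (x + PySem.Int.floordiv n x) 2 < x := by
  have hs0 := Int.sqrt_nonneg n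
  have hx1 : 1 ≤ x := by omega
  have hq := (PySem.Int.floordiv_eq_iff_of_pos (show (0:Int) < x by omega)).mp
    (rfl : PySem.Int.floordiv n x = PySem.Int.floordiv n x)
  set q := PySem.Int.floordiv n x with hqdef
  have hup := lt_succ_sqrt_sq n (by omega)
  refine (PySem.Int.floordiv_lt_iff_lt_mul (show (0:Int) < 2 by norm_num)).mpr ?_
  have hqs : q < Int.sqrt n + 1 := by nlinarith [hq.1]
  nlinarith

lemma isqrtLoop_eq (n : Int) (hn : 1 ≤ n) :
    ∀ (f : Nat) (x : Int), Int.sqrt n ≤ x → (x - Int.sqrt n).toNat ≤ f →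
      isqrtLoop n x f = Int.sqrt n := by
  intro f
  induction f with
  | zero =>
    intro x hx hf
    simp only [isqrtLoop]
    omega
  | succ f ih =>
    intro x hx hf
    have hs1 : 1 ≤ Int.sqrt n := one_le_sqrt n hn
    have hx1 : 1 ≤ x := le_trans hs1 hx
    simp only [isqrtLoop]
    by_cases hc : PySem.Int.floordiv (x + PySem.Int.floordiv n x) 2 < x
    · rw [if_pos hc]
      have hge := isqrt_step_ge n x hn hx1
      exact ih (PySem.Int.floordiv (x + PySem.Int.floordiv n x) 2) hge (by omega)
    · rw [if_neg hc]
      rcases le_or_gt x (Int.sqrt n) with h | h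
      · omega
      · exact absurd (isqrt_step_lt n x hn (by omega)) hc

lemma isqrt_eq (n : Int) (hn : 1 ≤ n) : isqrt n = Int.sqrt n := by
  have hs1 : 1 ≤ Int.sqrt n := one_le_sqrt n hn
  exact isqrtLoop_eq n hn (n.toNat + 1) n (sqrt_le_self n hn) (by omega)

-- --- B-side loop: altLoop returns the greatest admissible divisor ---
lemma altLoop_spec (n : Int) (hn : 1 ≤ n) :
    ∀ (f : Nat) (d best : Int), 1 ≤ d → 1 ≤ best →
      ((Int.sqrt n + 1) - d).toNat < f →
      (Good n best ∨ best = 1) →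
      (∀ c, Good n c → c < d → c ≤ best) →
      (Good n (altLoop n d best f) ∨ altLoop n d best f = 1) ∧
      (∀ c, Good n c → c ≤ altLoop n d best f) ∧ 1 ≤ altLoop n d best f := by
  intro f
  induction f with
  | zero => intro d best _ _ hf _ _; omega
  | succ f ih =>
    intro d best hd hb hf hgood hmax
    simp only [altLoop]
    by_cases hdd : d * d ≤ n
    · rw [if_pos hdd]
      have hds : d ≤ Int.sqrt n := le_sqrt_of_sq_le d n (by omega) hdd
      have hcond_iff :
          (PySem.Int.mod n d = 0 ∧ PySem.Int.mod (d + PySem.Int.floordiv n d) 2 = 0) ↔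
            Good n d := by
        rw [PySem.Int.mod_eq_zero_iff_dvd,
          PySem.Int.mod_eq_emod_of_pos (show (0:Int) < 2 by norm_num),
          PySem.Int.floordiv_eq_ediv_of_pos (show (0:Int) < d by omega)]
        unfold Good
        constructor
        · rintro ⟨h1, h2⟩; exact ⟨hd, h1, hdd, h2⟩
        · rintro ⟨_, h1, _, h2⟩; exact ⟨h1, h2⟩
      by_cases hco : PySem.Int.mod n d = 0 ∧ PySem.Int.mod (d + PySem.Int.floordiv n d) 2 = 0
      · rw [if_pos hco]
        exact ih (d + 1) d (by omega) (by omega) (by omega) (Or.inl (hcond_iff.mp hco))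
          (by intro c hc hcd; omega)
      · rw [if_neg hco]
        have hngd : ¬ Good n d := fun h => hco (hcond_iff.mpr h)
        refine ih (d + 1) best (by omega) hb (by omega) hgood ?_
        intro c hc hcd
        rcases lt_or_eq_of_le (show c ≤ d by omega) with h | h
        · exact hmax c hc h
        · exact absurd (h ▸ hc) hngd
    · rw [if_neg hdd]
      have hsd : Int.sqrt n < d := by
        rcases le_or_gt d (Int.sqrt n) with h | h
        · exfalso
          have hs0 := Int.sqrt_nonneg n
          have hmm : d * d ≤ Int.sqrt n * Int.sqrt n := by nlinarith
          exact hdd (le_trans hmm (sqrt_sq_le n (by omega)))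
        · exact h
      refine ⟨hgood, ?_, hb⟩
      intro c hc
      have hc1 := hc.1
      have hcs : c ≤ Int.sqrt n := le_sqrt_of_sq_le c n (by omega) hc.2.2.1
      exact hmax c hc (by omega)

-- one step of A's while-loop (used to peel off the always-taken first iteration)
lemma fermatLoop_step (n a b2 b : Int) (f : Nat) (h : b * b ≠ b2) :
    fermatLoop n a b2 b (f + 1)
      = fermatLoop n (a + 1) ((a + 1) * (a + 1) - n) (isqrt ((a + 1) * (a + 1) - n)) f := by
  simp only [fermatLoop]
  rw [if_pos h]

-- --- correspondence between admissible divisors and Fermat square points ---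
lemma good_to_point (n c : Int) (hn : 3 ≤ n) (hg : Good n c) (hne : c * c ≠ n) :
    ∃ a b e, c * e = n ∧ 2 * a = c + e ∧ 2 * b = e - c ∧ Int.sqrt n + 1 ≤ a ∧ 1 ≤ b ∧
      b * b = a * a - n ∧ a ≤ n := by
  obtain ⟨hc1, hdvd, hcc, hpar⟩ := hg
  obtain ⟨e, hediv, he, hpar'⟩ : ∃ e, n / c = e ∧ c * e = n ∧ (c + e) % 2 = 0 :=
    ⟨n / c, rfl, Int.mul_ediv_cancel' hdvd, hpar⟩
  have hce : c < e := by nlinarith [lt_of_le_of_ne hcc hne]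
  obtain ⟨a, ha⟩ : ∃ a, 2 * a = c + e := ⟨(c + e) / 2, by omega⟩
  obtain ⟨b, hbb⟩ : ∃ b, 2 * b = e - c := ⟨(e - c) / 2, by omega⟩
  have hb1 : 1 ≤ b := by omega
  have h4 : 4 * (b * b) = 4 * (a * a) - 4 * n := by
    linear_combination (-(2 * a + c + e)) * ha + (2 * b + e - c) * hbb - 4 * he
  have hsq : b * b = a * a - n := by linarith
  have ha1 : 1 ≤ a := by omega
  have han : Int.sqrt n + 1 ≤ a := by
    have hs0 := Int.sqrt_nonneg n
    have hup : a * a > Int.sqrt n * Int.sqrt n := by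
      nlinarith [sqrt_sq_le n (show (0:Int) ≤ n by omega)]
    nlinarith
  have hen : e ≤ n := by nlinarith
  exact ⟨a, b, e, he, ha, hbb, han, hb1, hsq, by omega⟩

lemma point_to_good (n a b : Int) (hn : 3 ≤ n) (ha : Int.sqrt n + 1 ≤ a) (hb : 0 ≤ b)
    (hsq : b * b = a * a - n) :
    Good n (a - b) ∧ (a - b) * (a - b) ≠ n ∧ (a - b) * (a + b) = n := by
  have hs0 := Int.sqrt_nonneg n
  have ha1 : 1 ≤ a := by omega
  have hba : b < a := by nlinarith
  have hc1 : 1 ≤ a - b := by omega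
  have hce : (a - b) * (a + b) = n := by linear_combination -hsq
  have hdvd : (a - b) ∣ n := ⟨a + b, hce.symm⟩
  have hdiv : n / (a - b) = a + b := by
    rw [← hce]
    exact Int.mul_ediv_cancel_left _ (by omega)
  have hcc : (a - b) * (a - b) ≤ n := by nlinarith
  have hpar : (a - b + n / (a - b)) % 2 = 0 := by
    rw [hdiv]; omega
  have hne : (a - b) * (a - b) ≠ n := by
    intro h
    have hb0 : b = 0 := by nlinarith
    have han : a * a = n := by nlinarith
    nlinarith [lt_succ_sqrt_sq n (show (0:Int) ≤ n by omega)]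
  exact ⟨⟨hc1, hdvd, hcc, hpar⟩, hne, hce⟩

-- strict antitonicity: a smaller admissible divisor gives a strictly larger Fermat point
lemma point_antitone (n c c' e e' a a' : Int) (hc1 : 1 ≤ c) (hc'1 : 1 ≤ c')
    (he : c * e = n) (he' : c' * e' = n) (hcc' : c' * c' ≤ n) (hlt : c < c')
    (h2a : 2 * a = c + e) (h2a' : 2 * a' = c' + e') : a' < a := by
  have hkey : (c + e - c' - e') * c' = (e - c') * (c' - c) := by
    linear_combination he - he'
  have hec' : c' < e := by nlinarith
  have hpos : 0 < (e - c') * (c' - c) := by nlinarith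
  have hX : 0 < c + e - c' - e' := by
    rcases le_or_gt (c + e - c' - e') 0 with h | h
    · exfalso; nlinarith
    · exact h
  linarith

-- --- A-side loop: exact value and output shape ---
lemma fermatLoop_eq (n a0 b0 : Int) (hn : 3 ≤ n)
    (ha0 : Int.sqrt n + 1 ≤ a0) (hb0 : 0 ≤ b0) (hsq : b0 * b0 = a0 * a0 - n)
    (hmin : ∀ a, Int.sqrt n + 1 ≤ a → a < a0 → ∀ b, 0 ≤ b → b * b ≠ a * a - n) :
    ∀ (f : Nat) (a : Int), Int.sqrt n + 1 ≤ a → a ≤ a0 → (a0 - a).toNat < f →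
      fermatLoop n a (a * a - n) (isqrt (a * a - n)) f = (a0, b0) := by
  intro f
  induction f with
  | zero => intro a _ _ hf; omega
  | succ f ih =>
    intro a ha haa hf
    have hs0 := Int.sqrt_nonneg n
    have hb2 : 1 ≤ a * a - n := by
      nlinarith [lt_succ_sqrt_sq n (show (0:Int) ≤ n by omega)]
    have hbeq : isqrt (a * a - n) = Int.sqrt (a * a - n) := isqrt_eq _ hb2
    rcases eq_or_lt_of_le haa with heq | hlt
    · subst heq
      have hb : isqrt (a * a - n) = b0 := by
        rw [hbeq, ← hsq, sqrt_sq_self b0 hb0]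
      rw [hb]
      simp only [fermatLoop]
      rw [if_neg (not_not_intro hsq)]
    · have hne : isqrt (a * a - n) * isqrt (a * a - n) ≠ a * a - n := by
        rw [hbeq]
        exact hmin a ha hlt _ (Int.sqrt_nonneg _)
      rw [fermatLoop_step n a (a * a - n) (isqrt (a * a - n)) f hne]
      exact ih (a + 1) (by omega) (by omega) (by omega)

lemma fermatLoop_form (n awit : Int) (hn : 3 ≤ n)
    (hwit : Int.sqrt n + 1 ≤ awit)
    (hsq : ∃ b, 0 ≤ b ∧ b * b = awit * awit - n) :
    ∀ (f : Nat) (a : Int), Int.sqrt n + 1 ≤ a → a ≤ awit → (awit - a).toNat < f →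
      ∃ a' b', Int.sqrt n + 1 ≤ a' ∧ 0 ≤ b' ∧ b' * b' = a' * a' - n ∧
        fermatLoop n a (a * a - n) (isqrt (a * a - n)) f = (a', b') := by
  intro f
  induction f with
  | zero => intro a _ _ hf; omega
  | succ f ih =>
    intro a ha haa hf
    have hs0 := Int.sqrt_nonneg n
    have hb2 : 1 ≤ a * a - n := by
      nlinarith [lt_succ_sqrt_sq n (show (0:Int) ≤ n by omega)]
    have hbeq : isqrt (a * a - n) = Int.sqrt (a * a - n) := isqrt_eq _ hb2
    by_cases hc : isqrt (a * a - n) * isqrt (a * a - n) = a * a - n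
    · refine ⟨a, isqrt (a * a - n), ha, by rw [hbeq]; exact Int.sqrt_nonneg _, hc, ?_⟩
      simp only [fermatLoop]
      rw [if_neg (not_not_intro hc)]
    · have hane : a ≠ awit := by
        intro h
        subst h
        obtain ⟨b, hb0, hbb⟩ := hsq
        have hsb : Int.sqrt (a * a - n) = b := by rw [← hbb, sqrt_sq_self b hb0]
        exact hc (by rw [hbeq, hsb]; exact hbb)
      obtain ⟨a', b', h1, h2, h3, h4⟩ := ih (a + 1) (by omega) (by omega) (by omega)
      refine ⟨a', b', h1, h2, h3, ?_⟩
      rw [fermatLoop_step n a (a * a - n) (isqrt (a * a - n)) f hc]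
      exact h4

-- squares ≥ 3 in Pre_ are ≥ 9 and are odd or divisible by 4
lemma square_facts (n : Int) (hpre : Pre_fermat n) (hss : Int.sqrt n * Int.sqrt n = n) :
    9 ≤ n ∧ (n % 2 = 1 ∨ n % 4 = 0) := by
  obtain ⟨hn3, hmod, hne4⟩ := hpre
  have hs1 : 1 ≤ Int.sqrt n := one_le_sqrt n (by omega)
  have h9 : 9 ≤ n := by
    rcases le_or_gt 9 n with h | h
    · exact h
    · exfalso
      have hs2 : Int.sqrt n ≤ 2 := by nlinarith
      have h12 : Int.sqrt n = 1 ∨ Int.sqrt n = 2 := by omega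
      rcases h12 with h1 | h1 <;> rw [h1] at hss <;> omega
  refine ⟨h9, ?_⟩
  rcases Int.even_or_odd (Int.sqrt n) with ⟨k, hk⟩ | ⟨k, hk⟩
  · right
    have h4' : (4:Int) ∣ n := ⟨k * k, by rw [← hss, hk]; ring⟩
    omega
  · left
    have h4' : (4:Int) ∣ n - 1 := ⟨k * k + k, by rw [← hss, hk]; ring⟩
    omega

-- under Pre_, the result of B's scan is an admissible divisor (and the greatest one)
lemma alt_result (n : Int) (hpre : Pre_fermat n) :
    ∃ r, altLoop n 1 1 (n.toNat + 2) = r ∧ Good n r ∧ (∀ c, Good n c → c ≤ r) := by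
  obtain ⟨hn3, hmod, hne4⟩ := hpre
  have hs1 : 1 ≤ Int.sqrt n := one_le_sqrt n (by omega)
  have hsn : Int.sqrt n ≤ n := sqrt_le_self n (by omega)
  have hspec := altLoop_spec n (by omega) (n.toNat + 2) 1 1 le_rfl le_rfl
    (by omega) (Or.inr rfl) (by intro c hc hcd; have := hc.1; omega)
  refine ⟨altLoop n 1 1 (n.toNat + 2), rfl, ?_, hspec.2.1⟩
  rcases (show n % 2 = 1 ∨ n % 4 = 0 by omega) with hodd | h4
  · have hg1 : Good n 1 := by
      refine ⟨le_rfl, one_dvd n, by omega, ?_⟩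
      simp only [Int.ediv_one]
      omega
    rcases hspec.1 with h | h
    · exact h
    · rw [h]; exact hg1
  · have hg2 : Good n 2 := by
      refine ⟨by norm_num, by omega, by omega, ?_⟩
      omega
    have h2r := hspec.2.1 2 hg2
    rcases hspec.1 with h | h
    · exact h
    · omega

-- under Pre_ and outside D_, no admissible divisor squares to n
lemma not_square_of_notD (n : Int) (hpre : Pre_fermat n) (hnd : ¬ D_fermat n)
    (r : Int) (hr1 : 1 ≤ r) (hrr : r * r = n) : False := by
  have hn3 := hpre.1
  have hrs : r = Int.sqrt n := by
    have h1 : r ≤ Int.sqrt n := le_sqrt_of_sq_le r n (by omega) (le_of_eq hrr)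
    have h2 : Int.sqrt n * Int.sqrt n ≤ n := sqrt_sq_le n (by omega)
    have hs0 := Int.sqrt_nonneg n
    nlinarith
  have hss : Int.sqrt n * Int.sqrt n = n := by rw [← hrs]; exact hrr
  have h9 := (square_facts n hpre hss).1
  exact hnd ⟨h9, by rw [intSqrt_eq n (by omega)]; exact hss⟩

-- main computation: under Pre_ and ¬D_, both programs return [n / r, r] for the
-- greatest admissible divisor r
lemma fermat_eq_alt (n : Int) (hpre : Pre_fermat n) (hnd : ¬ D_fermat n) :
    fermat n = fermat_alt n := by
  have hn3 := hpre.1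
  have hs1 : 1 ≤ Int.sqrt n := one_le_sqrt n (by omega)
  obtain ⟨r, hrdef, hgood, hmax⟩ := alt_result n hpre
  have hr1 : 1 ≤ r := hgood.1
  have hrr : r * r ≠ n := fun h => not_square_of_notD n hpre hnd r hr1 h
  obtain ⟨a0, b0, e0, he0, h2a, h2b, ha0, hb01, hsq, ha0n⟩ :=
    good_to_point n r hn3 hgood hrr
  have hmin : ∀ a, Int.sqrt n + 1 ≤ a → a < a0 → ∀ b, 0 ≤ b → b * b ≠ a * a - n := by
    intro a ha haa b hb hbb
    obtain ⟨hgc, hcne, hce⟩ := point_to_good n a b hn3 ha hb hbb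
    have hcr : a - b ≤ r := hmax _ hgc
    have h2a' : 2 * a = (a - b) + (a + b) := by ring
    rcases lt_or_eq_of_le hcr with h | h
    · have := point_antitone n (a - b) r (a + b) e0 a a0 hgc.1 hr1 hce he0
        hgood.2.2.1 h h2a' h2a
      omega
    · -- a - b = r : then a + b = e0, so a = a0, contradicting a < a0
      rw [h] at hce h2a'
      have heq : a + b = e0 := by
        have := mul_left_cancel₀ (show r ≠ 0 by omega) (hce.trans he0.symm)
        exact this
      rw [heq] at h2a'
      linarith
  -- run A: the first loop test always fails (stale b), then fermatLoop_eq applies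
  have hisq : isqrt n = Int.sqrt n := isqrt_eq n (by omega)
  have hA : fermat n = [a0 + b0, a0 - b0] := by
    have h0 : fermat n
        = [(fermatLoop n (isqrt n) (isqrt n * isqrt n - n) (isqrt n) (n.toNat + 2)).1
            + (fermatLoop n (isqrt n) (isqrt n * isqrt n - n) (isqrt n) (n.toNat + 2)).2,
           (fermatLoop n (isqrt n) (isqrt n * isqrt n - n) (isqrt n) (n.toNat + 2)).1
            - (fermatLoop n (isqrt n) (isqrt n * isqrt n - n) (isqrt n) (n.toNat + 2)).2] := rfl
    rw [h0, hisq]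
    have hstep1 : Int.sqrt n * Int.sqrt n ≠ Int.sqrt n * Int.sqrt n - n := by omega
    rw [show n.toNat + 2 = (n.toNat + 1) + 1 from rfl,
      fermatLoop_step n (Int.sqrt n) (Int.sqrt n * Int.sqrt n - n) (Int.sqrt n)
        (n.toNat + 1) hstep1,
      fermatLoop_eq n a0 b0 hn3 ha0 (by omega) hsq hmin (n.toNat + 1)
        (Int.sqrt n + 1) le_rfl ha0 (by omega)]
  -- run B
  have hB : fermat_alt n = [PySem.Int.floordiv n r, r] := by
    have h0 : fermat_alt n
        = [PySem.Int.floordiv n (altLoop n 1 1 (n.toNat + 2)), altLoop n 1 1 (n.toNat + 2)] :=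
      rfl
    rw [h0, hrdef]
  rw [hA, hB,
    PySem.Int.floordiv_eq_ediv_of_pos (show (0:Int) < r by omega),
    show n / r = e0 by rw [← he0]; exact Int.mul_ediv_cancel_left e0 (by omega)]
  have h1 : a0 + b0 = e0 := by omega
  have h2 : a0 - b0 = r := by omega
  rw [h1, h2]

-- ===== VERDICT (by name: the statement is the Claim_ definition above) =====
theorem fermat_spec : Claim_unchanged_fermat := by
  intro n _ hpre
  unfold Spec_fermat
  intro hnd
  exact fermat_eq_alt n hpre hnd

theorem fermat_changed : Claim_changed_fermat := by
  unfold Claim_changed_fermat; decide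

theorem fermat_tight : Claim_exact_fermat := by
  intro n _ hpre hD heq
  obtain ⟨hn3, hmod, hne4⟩ := hpre
  obtain ⟨h9, hsq9⟩ := hD
  have hss : Int.sqrt n * Int.sqrt n = n := by
    rw [← intSqrt_eq n (by omega)]; exact hsq9
  have hs1 : 1 ≤ Int.sqrt n := one_le_sqrt n (by omega)
  -- B returns [√n, √n]
  obtain ⟨r, hrdef, hgood, hmax⟩ := alt_result n ⟨hn3, hmod, hne4⟩
  have hdiv : n / Int.sqrt n = Int.sqrt n := by
    have h := Int.mul_ediv_cancel_left (a := Int.sqrt n) (Int.sqrt n)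
      (show Int.sqrt n ≠ 0 by omega)
    rw [hss] at h
    exact h
  have hgs : Good n (Int.sqrt n) := by
    refine ⟨hs1, ⟨Int.sqrt n, hss.symm⟩, by omega, ?_⟩
    rw [hdiv]; omega
  have hrs : r = Int.sqrt n := by
    have h1 : Int.sqrt n ≤ r := hmax _ hgs
    have h2 : r ≤ Int.sqrt n := le_sqrt_of_sq_le r n (by have := hgood.1; omega) hgood.2.2.1
    omega
  have hB : fermat_alt n = [Int.sqrt n, Int.sqrt n] := by
    have h0 : fermat_alt n
        = [PySem.Int.floordiv n (altLoop n 1 1 (n.toNat + 2)), altLoop n 1 1 (n.toNat + 2)] :=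
      rfl
    rw [h0, hrdef, hrs,
      PySem.Int.floordiv_eq_ediv_of_pos (show (0:Int) < Int.sqrt n by omega), hdiv]
  -- A returns a pair whose first element exceeds √n
  have hfacts := square_facts n ⟨hn3, hmod, hne4⟩ hss
  have hwitg : ∃ c, Good n c ∧ c * c ≠ n := by
    rcases hfacts.2 with hodd | h4
    · refine ⟨1, ⟨le_rfl, one_dvd n, by omega, ?_⟩, by omega⟩
      simp only [Int.ediv_one]
      omega
    · exact ⟨2, ⟨by norm_num, by omega, by omega, by omega⟩, by omega⟩
  obtain ⟨c, hgc, hcne⟩ := hwitg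
  obtain ⟨awit, bwit, ewit, hewit, h2a, h2b, hawit, hbwit, hsqwit, hawitn⟩ :=
    good_to_point n c hn3 hgc hcne
  have hisq : isqrt n = Int.sqrt n := isqrt_eq n (by omega)
  obtain ⟨a', b', ha', hb', hsq', hloop⟩ :=
    fermatLoop_form n awit hn3 hawit ⟨bwit, by omega, hsqwit⟩ (n.toNat + 1)
      (Int.sqrt n + 1) le_rfl hawit (by omega)
  have hA : fermat n = [a' + b', a' - b'] := by
    have h0 : fermat n
        = [(fermatLoop n (isqrt n) (isqrt n * isqrt n - n) (isqrt n) (n.toNat + 2)).1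
            + (fermatLoop n (isqrt n) (isqrt n * isqrt n - n) (isqrt n) (n.toNat + 2)).2,
           (fermatLoop n (isqrt n) (isqrt n * isqrt n - n) (isqrt n) (n.toNat + 2)).1
            - (fermatLoop n (isqrt n) (isqrt n * isqrt n - n) (isqrt n) (n.toNat + 2)).2] := rfl
    have hstep1 : Int.sqrt n * Int.sqrt n ≠ Int.sqrt n * Int.sqrt n - n := by omega
    rw [h0, hisq,
      show n.toNat + 2 = (n.toNat + 1) + 1 from rfl,
      fermatLoop_step n (Int.sqrt n) (Int.sqrt n * Int.sqrt n - n) (Int.sqrt n)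
        (n.toNat + 1) hstep1,
      hloop]
  rw [hA, hB] at heq
  have hhead : a' + b' = Int.sqrt n := by
    simpa using congrArg (fun l => l.headI) heq
  omega
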